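-- pv_equiv track=rewrite | github.com/LAKiTU64/rag-demo | backend/offline_llm.py | _extract_table_only
-- ===== SOURCE A (Python) =====
-- def _extract_table_only(markdown: str) -> str:
--     lines = markdown.splitlines()
--     collected = []
--     table_started = False
--     for line in lines:
--         stripped = line.strip()
--         if not stripped:
--             if table_started:
--                 break
--             continue
--         if "|" not in stripped:
--             if table_started:
--                 break
--             continue
--         if not table_started:
--             header_cells = [
--                 cell.strip().lower() for cell in stripped.strip("|").split("|")
--             ]
--             if not header_cells or "kernel" not in header_cells[0]:
--                 continue
--             table_started = True
--         collected.append(stripped if stripped.startswith("|") else f"| {stripped} |")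
--     return "\n".join(collected).strip()
-- ===== SOURCE B (Python) =====
-- def _extract_table_only(markdown: str) -> str:
--     # Block decomposition: group the stripped lines into maximal runs ("blocks")
--     # of table-like lines (non-empty, containing '|'); then return the suffix of
--     # the first block that starts at a kernel-header line, formatted and joined.
--     blocks = []
--     cur = []
--     for line in markdown.splitlines():
--         s = line.strip()
--         if s and "|" in s:
--             cur.append(s)
--         elif cur:
--             blocks.append(cur)
--             cur = []
--     if cur:
--         blocks.append(cur)
--     for block in blocks:
--         for i, s in enumerate(block):
--             if "kernel" in s.strip("|").split("|")[0].strip().lower():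
--                 rows = [r if r.startswith("|") else f"| {r} |" for r in block[i:]]
--                 return "\n".join(rows).strip()
--     return ""
-- ===== Notes on version B (the rewrite author's own statement) =====
-- stated objective: alternative
-- what changed: Replaced A's single stateful skip/collect loop (table_started flag, break/continue) by a block decomposition: group stripped lines into maximal runs of table-like lines, then search the runs for the first kernel-header line and return that run's suffix.
import Mathlib
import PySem

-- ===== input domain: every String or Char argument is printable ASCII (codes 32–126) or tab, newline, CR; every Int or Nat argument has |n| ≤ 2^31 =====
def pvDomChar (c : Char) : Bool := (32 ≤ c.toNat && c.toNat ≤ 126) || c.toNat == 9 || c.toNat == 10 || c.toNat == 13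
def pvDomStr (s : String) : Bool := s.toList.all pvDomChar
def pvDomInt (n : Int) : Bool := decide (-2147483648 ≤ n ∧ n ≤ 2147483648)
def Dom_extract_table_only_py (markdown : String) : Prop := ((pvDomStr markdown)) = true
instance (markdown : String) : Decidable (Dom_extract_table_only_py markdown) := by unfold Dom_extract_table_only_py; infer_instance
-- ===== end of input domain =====

-- B groups the stripped lines into maximal blocks of table-like lines and returns the
-- first block suffix starting at a kernel header; same return value as A on every input.

-- ===== PORT A =====
-- the single stateful loop of A: state = (collected, table_started), early break = returning collected
def pvLoopA : List String → List String → Bool → List String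
  | [], collected, _ => collected
  | line :: rest, collected, started =>
    let stripped := PySem.Str.strip line
    if stripped = "" then
      if started then collected else pvLoopA rest collected started
    else if ¬ (PySem.Str.isIn "|" stripped) then
      if started then collected else pvLoopA rest collected started
    else if ¬ started then
      let header_cells := ((PySem.Str.split? (PySem.Str.stripChars stripped "|") "|").getD []).map
        (fun cell => PySem.Str.lower (PySem.Str.strip cell))
      if header_cells.isEmpty || !(PySem.Str.isIn "kernel" (header_cells.headD "")) then
        pvLoopA rest collected started
      else
        pvLoopA rest (collected ++ [if PySem.Str.startswith stripped "|" then stripped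
                                    else PySem.Str.join "" ["| ", stripped, " |"]]) true
    else
      pvLoopA rest (collected ++ [if PySem.Str.startswith stripped "|" then stripped
                                  else PySem.Str.join "" ["| ", stripped, " |"]]) true

def extract_table_only_py (markdown : String) : String :=
  PySem.Str.strip (PySem.Str.join "\n" (pvLoopA (PySem.Str.splitlines markdown) [] false))

-- ===== PORT B =====
-- "kernel" in s.strip("|").split("|")[0].strip().lower()
def pvKernelHead (s : String) : Bool :=
  PySem.Str.isIn "kernel"
    (PySem.Str.lower (PySem.Str.strip (((PySem.Str.split? (PySem.Str.stripChars s "|") "|").getD []).headD "")))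

-- r if r.startswith("|") else f"| {r} |"
def pvFmt (r : String) : String :=
  if PySem.Str.startswith r "|" then r else PySem.Str.join "" ["| ", r, " |"]

-- the block-building loop: state = (blocks so far implicit in the result, cur)
def pvBlocks : List String → List String → List (List String)
  | [], cur => if cur.isEmpty then [] else [cur]
  | l :: rest, cur =>
    let s := PySem.Str.strip l
    if s ≠ "" ∧ PySem.Str.isIn "|" s = true then pvBlocks rest (cur ++ [s])
    else if cur.isEmpty then pvBlocks rest []
    else cur :: pvBlocks rest []

-- the inner 'for i, s in enumerate(block)' search: returns block[i:] at the first header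
def pvFindIn : List String → Option (List String)
  | [] => none
  | s :: rest => if pvKernelHead s then some (s :: rest) else pvFindIn rest

-- the outer 'for block in blocks' loop with its early return
def pvSearch : List (List String) → String
  | [] => ""
  | b :: bs =>
    match pvFindIn b with
    | some tail => PySem.Str.strip (PySem.Str.join "\n" (tail.map pvFmt))
    | none => pvSearch bs

def extract_table_only_py_alt (markdown : String) : String :=
  pvSearch (pvBlocks (PySem.Str.splitlines markdown) [])

-- ===== PRECONDITION & SPEC =====
def Spec_extract_table_only_py (markdown : String) (out : String) : Prop := out = extract_table_only_py_alt markdown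
instance (markdown : String) (out : String) : Decidable (Spec_extract_table_only_py markdown out) := by unfold Spec_extract_table_only_py; infer_instance

-- ===== CLAIM (what is proved, stated in full; the proofs are below) =====
def Claim_equal_extract_table_only_py : Prop := ∀ (markdown : String), Dom_extract_table_only_py markdown → Spec_extract_table_only_py markdown (extract_table_only_py markdown)

-- ===== LEMMAS AND PROOFS =====

-- proof-only helpers: A's behaviour characterised via dropWhile/collect
def pvIsHeader (s : String) : Bool :=
  s ≠ "" && PySem.Str.isIn "|" s && pvKernelHead s

def pvCollect : List String → List String
  | [] => []
  | s :: rest =>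
    if s = "" ∨ ¬ (PySem.Str.isIn "|" s) then []
    else pvFmt s :: pvCollect rest

-- A's in-loop header test is the negation of pvIsHeader on the stripped line
theorem header_eq (s : String) (hne : ¬ s = "")
    (hpipe : PySem.Chars.isIn ['|'] s.toList = true) :
    ((((PySem.Str.split? (PySem.Str.stripChars s "|") "|").getD []).map
        (fun cell => PySem.Str.lower (PySem.Str.strip cell))).isEmpty
      || !(PySem.Str.isIn "kernel"
        ((((PySem.Str.split? (PySem.Str.stripChars s "|") "|").getD []).map
          (fun cell => PySem.Str.lower (PySem.Str.strip cell))).headD ""))) =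
    !(pvIsHeader s) := by
  unfold pvIsHeader pvKernelHead
  cases h : (PySem.Str.split? (PySem.Str.stripChars s "|") "|").getD [] with
  | nil => simp [hne, hpipe]; decide
  | cons c cs => simp [hne, hpipe]

-- once the table has started, A's loop appends exactly what pvCollect collects
theorem loopA_started (lines : List String) (collected : List String) :
    pvLoopA lines collected true = collected ++ pvCollect (lines.map PySem.Str.strip) := by
  induction lines generalizing collected with
  | nil => simp [pvLoopA, pvCollect]
  | cons l rest ih =>
    simp only [pvLoopA, List.map_cons, pvCollect]
    by_cases h1 : PySem.Str.strip l = ""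
    · simp [h1]
    · by_cases h2 : PySem.Chars.isIn ['|'] (PySem.Chars.strip l.toList) = true
      · simp [h1, h2, ih, pvFmt]
      · simp at h2
        simp [h1, h2]

-- before the table has started, A's loop skips exactly the non-header lines
theorem loopA_seek (lines : List String) :
    pvLoopA lines [] false =
      pvCollect ((lines.map PySem.Str.strip).dropWhile (fun s => !(pvIsHeader s))) := by
  induction lines with
  | nil => simp [pvLoopA, pvCollect]
  | cons l rest ih =>
    simp only [pvLoopA, List.map_cons]
    by_cases h1 : PySem.Str.strip l = ""
    · have hh : pvIsHeader (PySem.Str.strip l) = false := by simp [pvIsHeader, h1]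
      rw [h1] at hh
      simp [h1, ih, List.dropWhile, hh]
    · by_cases h2 : PySem.Chars.isIn ['|'] (PySem.Chars.strip l.toList) = true
      · have hs : PySem.Chars.isIn ['|'] (PySem.Str.strip l).toList = true := by simpa using h2
        have hc := header_eq (PySem.Str.strip l) h1 hs
        simp at hc
        by_cases h3 : pvIsHeader (PySem.Str.strip l) = true
        · simp [h1, h2, hc, h3, loopA_started, List.dropWhile, pvCollect, pvFmt]
        · have hh : pvIsHeader (PySem.Str.strip l) = false := by
            cases hv : pvIsHeader (PySem.Str.strip l) <;> simp_all
          simp [h1, h2, hc, hh, ih, List.dropWhile]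
      · have hh : pvIsHeader (PySem.Str.strip l) = false := by
          simp [pvIsHeader]
          intro _ hp
          exact absurd (by simpa using hp) h2
        simp at h2
        simp [h1, h2, ih, List.dropWhile, hh]

-- B-side characterisation -----------------------------------------------------

theorem findIn_append (pre xs : List String) (h : pvFindIn pre = none) :
    pvFindIn (pre ++ xs) = pvFindIn xs := by
  induction pre with
  | nil => simp
  | cons s t ih =>
    by_cases hs : pvKernelHead s = true
    · simp [pvFindIn, hs] at h
    · simp [pvFindIn, hs] at h ⊢
      exact ih h

-- once a header is in the current block, B's search returns that suffix plus the rest of the run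
theorem search_found (lines : List String) (pre : List String) (s : String) (post : List String)
    (hpre : pvFindIn pre = none) (hs : pvKernelHead s = true) :
    pvSearch (pvBlocks lines (pre ++ s :: post)) =
      PySem.Str.strip (PySem.Str.join "\n"
        ((s :: post).map pvFmt ++ pvCollect (lines.map PySem.Str.strip))) := by
  have hf : pvFindIn (pre ++ s :: post) = some (s :: post) := by
    rw [findIn_append _ _ hpre]; simp [pvFindIn, hs]
  induction lines generalizing post with
  | nil =>
    have hf : pvFindIn (pre ++ s :: post) = some (s :: post) := by
      rw [findIn_append _ _ hpre]; simp [pvFindIn, hs]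
    simp [pvBlocks, pvSearch, hf, pvCollect]
  | cons l rest ih =>
    simp only [pvBlocks, List.map_cons]
    by_cases h1 : PySem.Str.strip l = ""
    · have hf : pvFindIn (pre ++ s :: post) = some (s :: post) := by
        rw [findIn_append _ _ hpre]; simp [pvFindIn, hs]
      simp [h1, pvSearch, hf, pvCollect]
    · by_cases h2 : PySem.Chars.isIn ['|'] (PySem.Chars.strip l.toList) = true
      · have := ih (post ++ [PySem.Str.strip l]) (by
          rw [findIn_append _ _ hpre]; simp [pvFindIn, hs])
        simp [h1, h2, pvCollect, pvFmt] at this ⊢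
        rw [this]
      · have hf : pvFindIn (pre ++ s :: post) = some (s :: post) := by
          rw [findIn_append _ _ hpre]; simp [pvFindIn, hs]
        have h2' : PySem.Chars.isIn ['|'] (PySem.Chars.strip l.toList) = false := by
          cases hv : PySem.Chars.isIn ['|'] (PySem.Chars.strip l.toList) <;> simp_all
        simp [h1, h2', pvSearch, hf, pvCollect]

-- while no header has been seen, B's search equals collect-after-dropWhile
theorem search_seek (lines : List String) (pre : List String) (hpre : pvFindIn pre = none) :
    pvSearch (pvBlocks lines pre) =
      PySem.Str.strip (PySem.Str.join "\n"
        (pvCollect ((lines.map PySem.Str.strip).dropWhile (fun s => !(pvIsHeader s))))) := by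
  induction lines generalizing pre with
  | nil =>
    cases pre with
    | nil => simp [pvBlocks, pvSearch, pvCollect]; decide
    | cons a b => simp [pvBlocks, pvSearch, hpre, pvCollect]; decide
  | cons l rest ih =>
    simp only [pvBlocks, List.map_cons]
    by_cases h1 : PySem.Str.strip l = ""
    · have hh : pvIsHeader (PySem.Str.strip l) = false := by simp [pvIsHeader, h1]
      rw [h1] at hh
      by_cases hc : pre = []
      · simp [h1, hc, ih [] rfl, List.dropWhile, hh]
      · simp [h1, hc, pvSearch, hpre, ih [] rfl, List.dropWhile, hh]
    · by_cases h2 : PySem.Chars.isIn ['|'] (PySem.Chars.strip l.toList) = true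
      · by_cases h3 : pvKernelHead (PySem.Str.strip l) = true
        · have hh : pvIsHeader (PySem.Str.strip l) = true := by
            simp [pvIsHeader, h1, h3]
            simpa using h2
          have := search_found rest pre (PySem.Str.strip l) [] hpre h3
          simp at this
          simp [h1, h2, List.dropWhile, hh, pvCollect]
          rw [this]
        · have hh : pvIsHeader (PySem.Str.strip l) = false := by simp [pvIsHeader, h3]
          have hpre' : pvFindIn (pre ++ [PySem.Str.strip l]) = none := by
            rw [findIn_append _ _ hpre]; simp [pvFindIn, h3]
          simp [h1, h2, ih _ hpre', List.dropWhile, hh]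
      · have h2' : PySem.Chars.isIn ['|'] (PySem.Chars.strip l.toList) = false := by
          cases hv : PySem.Chars.isIn ['|'] (PySem.Chars.strip l.toList) <;> simp_all
        have hh : pvIsHeader (PySem.Str.strip l) = false := by
          simp [pvIsHeader]
          intro _ hp
          exact absurd (by simpa using hp) (by simp [h2'])
        by_cases hc : pre = []
        · simp [h1, h2', hc, ih [] rfl, List.dropWhile, hh]
        · simp [h1, h2', hc, pvSearch, hpre, ih [] rfl, List.dropWhile, hh]

-- ===== VERDICT (by name: the statement is the Claim_ definition above) =====
theorem extract_table_only_py_spec : Claim_equal_extract_table_only_py := by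
  intro markdown _
  unfold Spec_extract_table_only_py extract_table_only_py extract_table_only_py_alt
  rw [loopA_seek, search_seek _ [] rfl]
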